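-- pv_equiv track=rewrite | github.com/enjoy-digital/litex | migen/genlib/mhamgen.py | build_seq
-- ===== SOURCE A (Python) =====
-- def build_seq(bnum, out_width):
-- 	tmp = []
--
-- 	ptr = 0
-- 	cur = 0
-- 	skip = 2**bnum-1
-- 	if skip == 0:
-- 		check = 2**bnum
-- 	else:
-- 		check = 0
-- 	while cur < out_width:
-- 		if check > 0:
-- 			if (cur != 2**bnum-1):
-- 				tmp.append(cur)
-- 				ptr += 1
-- 			check -= 1
-- 			if check == 0:
-- 				skip = 2**bnum
-- 		else:
-- 			skip -= 1
-- 			if skip == 0: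
-- 				check = 2**bnum
-- 		cur += 1
--
-- 	return tmp
-- ===== SOURCE B (Python) =====
-- def build_seq(bnum, out_width):
-- 	if bnum < 0:
-- 		# an integer has no bits set below the binary point
-- 		return []
-- 	block = 1 << bnum
-- 	return [cur for cur in range(out_width)
-- 	        if (cur + 1) % (2 * block) >= block and cur + 1 != block]
-- ===== Notes on version B (the rewrite author's own statement) =====
-- stated objective: simpler
-- what changed: Replaces the phase-alternating state machine (check/skip/ptr counters threaded across iterations) with a single stateless comprehension that keeps cur exactly when (cur+1) % (2*2**bnum) >= 2**bnum and cur+1 != 2**bnum; a negative bit index selects nothing.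
import Mathlib
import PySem

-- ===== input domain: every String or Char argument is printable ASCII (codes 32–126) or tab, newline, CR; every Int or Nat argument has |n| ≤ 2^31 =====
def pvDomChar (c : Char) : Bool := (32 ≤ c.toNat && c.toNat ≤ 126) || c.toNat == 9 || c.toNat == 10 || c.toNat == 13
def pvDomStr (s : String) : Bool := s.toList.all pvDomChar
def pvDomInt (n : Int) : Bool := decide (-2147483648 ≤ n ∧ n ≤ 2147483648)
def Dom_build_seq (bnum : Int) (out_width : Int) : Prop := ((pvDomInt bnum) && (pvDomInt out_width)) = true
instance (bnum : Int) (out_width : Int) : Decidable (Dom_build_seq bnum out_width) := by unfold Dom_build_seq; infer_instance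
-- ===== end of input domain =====

-- B replaces A's phase-alternating check/skip/ptr state machine with one stateless
-- per-index filter predicate; same O(out_width) cost, objective: simpler.


-- ===== PORT A =====
-- Literal transliteration of A's while loop; state (tmp, ptr, cur, skip, check).
-- For bnum < 0 Python's 2**bnum is a float: every float value reached here is an
-- exact dyadic rational (or, after underflow to 0.0, shares its sign/zero tests
-- with the rational), so skip/check are carried in ℚ and (2:ℚ)^bnum is zpow;
-- this is exact on the whole domain.
def buildLoopA (bnum : Int) (out_width : Int) (tmp : List Int) (ptr : Int)
    (cur : Int) (skip : ℚ) (check : ℚ) : List Int :=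
  if cur < out_width then
    if check > 0 then
      let tmp' := if (cur : ℚ) ≠ (2:ℚ) ^ bnum - 1 then tmp ++ [cur] else tmp
      let ptr' := if (cur : ℚ) ≠ (2:ℚ) ^ bnum - 1 then ptr + 1 else ptr
      let check' := check - 1
      let skip' := if check' = 0 then (2:ℚ) ^ bnum else skip
      buildLoopA bnum out_width tmp' ptr' (cur + 1) skip' check'
    else
      let skip' := skip - 1
      let check' := if skip' = 0 then (2:ℚ) ^ bnum else check
      buildLoopA bnum out_width tmp ptr (cur + 1) skip' check'
  else tmp
termination_by (out_width - cur).toNat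
decreasing_by all_goals omega

def build_seq (bnum : Int) (out_width : Int) : List Int :=
  let skip : ℚ := (2:ℚ) ^ bnum - 1
  let check : ℚ := if skip = 0 then (2:ℚ) ^ bnum else 0
  buildLoopA bnum out_width [] 0 0 skip check

-- ===== PORT B =====
def build_seq_alt (bnum : Int) (out_width : Int) : List Int :=
  if bnum < 0 then []
  else
    let block : Int := (2:Int) ^ bnum.toNat
    (PySem.List.pyRange 0 out_width 1).filter
      (fun cur => decide (block ≤ PySem.Int.mod (cur + 1) (2 * block)) && decide (cur + 1 ≠ block))

-- ===== PRECONDITION & SPEC =====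
def Spec_build_seq (bnum : Int) (out_width : Int) (out : List Int) : Prop := out = build_seq_alt bnum out_width
instance (bnum : Int) (out_width : Int) (out : List Int) : Decidable (Spec_build_seq bnum out_width out) := by unfold Spec_build_seq; infer_instance

-- ===== CLAIM (what is proved, stated in full; the proofs are below) =====
def Claim_equal_build_seq : Prop := ∀ (bnum : Int) (out_width : Int), Dom_build_seq bnum out_width → Spec_build_seq bnum out_width (build_seq bnum out_width)

-- ===== LEMMAS AND PROOFS =====

-- integer image of A's loop for bnum ≥ 0, with k = 2 ^ bnum
def loopI (k : Int) (out_width : Int) (tmp : List Int) (ptr : Int)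
    (cur : Int) (skip : Int) (check : Int) : List Int :=
  if cur < out_width then
    if check > 0 then
      let tmp' := if cur ≠ k - 1 then tmp ++ [cur] else tmp
      let ptr' := if cur ≠ k - 1 then ptr + 1 else ptr
      let check' := check - 1
      let skip' := if check' = 0 then k else skip
      loopI k out_width tmp' ptr' (cur + 1) skip' check'
    else
      let skip' := skip - 1
      let check' := if skip' = 0 then k else check
      loopI k out_width tmp ptr (cur + 1) skip' check'
  else tmp
termination_by (out_width - cur).toNat
decreasing_by all_goals omega

-- for bnum ≥ 0 the ℚ state of A's loop is the cast of the integer machine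
theorem pv_cast_loop (bnum out_width : Int) (hb : 0 ≤ bnum) (n : Nat) :
    ∀ (cur : Int) (tmp : List Int) (ptr si ci : Int),
      (out_width - cur).toNat = n →
      buildLoopA bnum out_width tmp ptr cur (si : ℚ) (ci : ℚ)
        = loopI ((2:Int) ^ bnum.toNat) out_width tmp ptr cur si ci := by
  have e1 : bnum = (bnum.toNat : Int) := by omega
  have hk : (2:ℚ) ^ bnum = (((2:Int) ^ bnum.toNat : Int) : ℚ) :=
    calc (2:ℚ) ^ bnum = (2:ℚ) ^ ((bnum.toNat : Int)) := by rw [← e1]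
      _ = (2:ℚ) ^ (bnum.toNat) := zpow_natCast _ _
      _ = (((2:Int) ^ bnum.toNat : Int) : ℚ) := by push_cast; ring
  have hk1 : ((2:ℚ) ^ bnum - 1) = (((2:Int) ^ bnum.toNat - 1 : Int) : ℚ) := by
    rw [hk]; push_cast; ring
  induction n with
  | zero =>
    intro cur tmp ptr si ci hn
    have hge : ¬ cur < out_width := by omega
    rw [buildLoopA, loopI, if_neg hge, if_neg hge]
  | succ n ih =>
    intro cur tmp ptr si ci hn
    by_cases hlt : cur < out_width
    · rw [buildLoopA, loopI, if_pos hlt, if_pos hlt]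
      by_cases hc : ci > 0
      · rw [if_pos (show ((ci:ℚ) > 0) by exact_mod_cast hc), if_pos hc]
        have htmp : (if (cur : ℚ) ≠ (2:ℚ) ^ bnum - 1 then tmp ++ [cur] else tmp)
            = (if cur ≠ (2:Int) ^ bnum.toNat - 1 then tmp ++ [cur] else tmp) := by
          rw [hk1]; norm_cast
        have hptr : (if (cur : ℚ) ≠ (2:ℚ) ^ bnum - 1 then ptr + 1 else ptr)
            = (if cur ≠ (2:Int) ^ bnum.toNat - 1 then ptr + 1 else ptr) := by
          rw [hk1]; norm_cast
        have hchk : (ci : ℚ) - 1 = ((ci - 1 : Int) : ℚ) := by push_cast; ring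
        have hskp : (if ((ci - 1 : Int) : ℚ) = 0 then (2:ℚ) ^ bnum else (si : ℚ))
            = (((if ci - 1 = 0 then (2:Int) ^ bnum.toNat else si) : Int) : ℚ) := by
          rw [hk]
          by_cases h : ci - 1 = 0
          · rw [if_pos (by exact_mod_cast h), if_pos h]
          · rw [if_neg (by exact_mod_cast h), if_neg h]
        simp only [htmp, hptr, hchk, hskp]
        exact ih (cur + 1) _ _ _ _ (by omega)
      · rw [if_neg (show ¬ ((ci:ℚ) > 0) by exact_mod_cast hc), if_neg hc]
        have hs1 : (si : ℚ) - 1 = ((si - 1 : Int) : ℚ) := by push_cast; ring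
        have hck : (if ((si - 1 : Int) : ℚ) = 0 then (2:ℚ) ^ bnum else (ci : ℚ))
            = (((if si - 1 = 0 then (2:Int) ^ bnum.toNat else ci) : Int) : ℚ) := by
          rw [hk]
          by_cases h : si - 1 = 0
          · rw [if_pos (by exact_mod_cast h), if_pos h]
          · rw [if_neg (by exact_mod_cast h), if_neg h]
        simp only [hs1, hck]
        exact ih (cur + 1) _ _ _ _ (by omega)
    · rw [buildLoopA, loopI, if_neg hlt, if_neg hlt]

-- for bnum < 0 the loop never emits: skip stays negative, check stays 0
theorem pv_loop_neg (bnum out_width : Int) (n : Nat) :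
    ∀ (cur : Int) (tmp : List Int) (ptr : Int) (skip check : ℚ),
      (out_width - cur).toNat = n → check = 0 → skip < 0 →
      buildLoopA bnum out_width tmp ptr cur skip check = tmp := by
  induction n with
  | zero =>
    intro cur tmp ptr skip check hn _ _
    rw [buildLoopA, if_neg (by omega)]
  | succ n ih =>
    intro cur tmp ptr skip check hn hc hs
    by_cases hlt : cur < out_width
    · rw [buildLoopA, if_pos hlt, if_neg (by rw [hc]; norm_num)]
      have hs' : skip - 1 < 0 := by linarith
      exact ih (cur + 1) tmp ptr (skip - 1) _ (by omega)
        (by rw [if_neg (ne_of_lt hs')]; exact hc) hs'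
    · rw [buildLoopA, if_neg hlt]

-- successor of an Int residue modulo b
theorem pv_emod_succ (a b : Int) (hb : 2 ≤ b) :
    (a + 1) % b = if a % b = b - 1 then 0 else a % b + 1 := by
  have h0 := Int.emod_nonneg a (by omega : b ≠ 0)
  have h1 := Int.emod_lt_of_pos a (by omega : 0 < b)
  rw [Int.add_emod]
  have h2 : (1:Int) % b = 1 := Int.emod_eq_of_lt (by omega) (by omega)
  rw [h2]
  split_ifs with h
  · rw [h]
    have : b - 1 + 1 = b := by omega
    rw [this, Int.emod_self]
  · exact Int.emod_eq_of_lt (by omega) (by omega)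

-- loop invariant of A's state machine, phrased on the residue cur % (2k)
def pvInv (k cur skip check : Int) : Prop :=
  (k - 1 ≤ cur % (2 * k) ∧ cur % (2 * k) ≤ 2 * k - 2 ∧ check = 2 * k - 1 - cur % (2 * k))
  ∨ (check = 0 ∧ ((cur % (2 * k) = 2 * k - 1 ∧ skip = k)
      ∨ (cur % (2 * k) ≤ k - 2 ∧ skip = k - 1 - cur % (2 * k))))

theorem pv_loop_eq (k out_width : Int) (hk : 1 ≤ k) (n : Nat) :
    ∀ (cur : Int) (tmp : List Int) (ptr skip check : Int),
      (out_width - cur).toNat = n →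
      pvInv k cur skip check →
      loopI k out_width tmp ptr cur skip check
        = tmp ++ (PySem.List.pyRange cur out_width 1).filter
            (fun c => decide (k ≤ PySem.Int.mod (c + 1) (2 * k)) && decide (c + 1 ≠ k)) := by
  induction n with
  | zero =>
    intro cur tmp ptr skip check hn _
    have hge : out_width ≤ cur := by omega
    rw [loopI, PySem.List.pyRange_one_eq_nil hge]
    simp [not_lt.mpr hge]
  | succ n ih =>
    intro cur tmp ptr skip check hn hinv
    have hlt : cur < out_width := by omega
    have hmod : PySem.Int.mod (cur + 1) (2 * k) = (cur + 1) % (2 * k) :=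
      PySem.Int.mod_eq_emod_of_pos (by omega)
    have h0 := Int.emod_nonneg cur (by omega : 2 * k ≠ 0)
    have h1 := Int.emod_lt_of_pos cur (by omega : 0 < 2 * k)
    have hsucc := pv_emod_succ cur (2 * k) (by omega)
    rw [loopI, if_pos hlt, PySem.List.pyRange_one_cons hlt]
    rcases hinv with ⟨hm1, hm2, hc⟩ | ⟨hc, hsk⟩
    · -- emit phase: check = 2k-1-m > 0
      have hcpos : check > 0 := by omega
      rw [if_pos hcpos]
      have hm' : (cur + 1) % (2 * k) = cur % (2 * k) + 1 := by
        rw [hsucc, if_neg (by omega)]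
      have hinv' : pvInv k (cur + 1) (if check - 1 = 0 then k else skip) (check - 1) := by
        unfold pvInv
        rw [hm']
        by_cases hend : cur % (2 * k) = 2 * k - 2
        · right
          refine ⟨by omega, Or.inl ⟨by omega, ?_⟩⟩
          rw [if_pos (by omega)]
        · left
          exact ⟨by omega, by omega, by omega⟩
      rw [ih (cur + 1) _ _ _ _ (by omega) hinv']
      have hpred1 : k ≤ PySem.Int.mod (cur + 1) (2 * k) := by rw [hmod, hm']; omega
      rw [List.filter_cons]
      by_cases hne : cur = k - 1
      · -- the excluded parity position 2**bnum - 1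
        rw [if_neg (show ¬ (cur ≠ k - 1) by omega),
            if_neg (show ¬ ((decide (k ≤ PySem.Int.mod (cur + 1) (2 * k))
                && decide (cur + 1 ≠ k)) = true) by
              simp only [Bool.and_eq_true, decide_eq_true_eq, not_and]
              intro _; omega)]
      · rw [if_pos (show cur ≠ k - 1 from hne),
            if_pos (show (decide (k ≤ PySem.Int.mod (cur + 1) (2 * k))
                && decide (cur + 1 ≠ k)) = true by
              simp only [Bool.and_eq_true, decide_eq_true_eq]
              exact ⟨hpred1, by omega⟩)]
        simp
    · -- skip phase: check = 0
      rw [if_neg (by omega)]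
      have hinv' : pvInv k (cur + 1) (skip - 1) (if skip - 1 = 0 then k else check) := by
        unfold pvInv
        rcases hsk with ⟨hm, hs⟩ | ⟨hm, hs⟩
        · have hm' : (cur + 1) % (2 * k) = 0 := by rw [hsucc, if_pos (by omega)]
          rw [hm']
          by_cases hk1 : k = 1
          · left
            rw [if_pos (by omega)]
            exact ⟨by omega, by omega, by omega⟩
          · right
            rw [if_neg (by omega)]
            exact ⟨hc, Or.inr ⟨by omega, by omega⟩⟩
        · have hm' : (cur + 1) % (2 * k) = cur % (2 * k) + 1 := by
            rw [hsucc, if_neg (by omega)]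
          rw [hm']
          by_cases hend : cur % (2 * k) = k - 2
          · left
            rw [if_pos (by omega)]
            exact ⟨by omega, by omega, by omega⟩
          · right
            rw [if_neg (by omega)]
            exact ⟨hc, Or.inr ⟨by omega, by omega⟩⟩
      rw [ih (cur + 1) _ _ _ _ (by omega) hinv']
      have hpred : ¬ k ≤ PySem.Int.mod (cur + 1) (2 * k) := by
        rw [hmod, hsucc]
        rcases hsk with ⟨hm, _⟩ | ⟨hm, _⟩
        · rw [if_pos (by omega)]; omega
        · rw [if_neg (by omega)]; omega
      rw [List.filter_cons,
          if_neg (show ¬ ((decide (k ≤ PySem.Int.mod (cur + 1) (2 * k))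
              && decide (cur + 1 ≠ k)) = true) by
            simp only [Bool.and_eq_true, decide_eq_true_eq, not_and]
            intro h; exact absurd h hpred)]

-- ===== VERDICT (by name: the statement is the Claim_ definition above) =====
theorem build_seq_spec : Claim_equal_build_seq := by
  intro bnum out_width _
  unfold Spec_build_seq build_seq build_seq_alt
  by_cases hb : bnum < 0
  · rw [if_pos hb]
    have hlt1 : (2:ℚ) ^ bnum < 1 := by
      apply zpow_lt_one_of_neg₀ (by norm_num : (1:ℚ) < 2) (by omega)
    have hpos : (0:ℚ) < (2:ℚ) ^ bnum := by positivity
    have hs : (2:ℚ) ^ bnum - 1 < 0 := by linarith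
    exact pv_loop_neg bnum out_width (out_width - 0).toNat 0 [] 0 _ _ rfl
      (by rw [if_neg (ne_of_lt hs)]) hs
  · rw [if_neg hb]
    have hb' : 0 ≤ bnum := by omega
    show buildLoopA bnum out_width [] 0 0 ((2:ℚ) ^ bnum - 1)
        (if (2:ℚ) ^ bnum - 1 = 0 then (2:ℚ) ^ bnum else 0)
      = (PySem.List.pyRange 0 out_width 1).filter
          (fun cur => decide ((2:Int) ^ bnum.toNat ≤ PySem.Int.mod (cur + 1) (2 * (2:Int) ^ bnum.toNat))
            && decide (cur + 1 ≠ (2:Int) ^ bnum.toNat))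
    set k : Int := (2:Int) ^ bnum.toNat with hkdef
    have hk1 : 1 ≤ k := by rw [hkdef]; exact one_le_pow₀ (by norm_num)
    have hkq : (2:ℚ) ^ bnum = ((k : Int) : ℚ) := by
      rw [hkdef]
      calc (2:ℚ) ^ bnum = (2:ℚ) ^ ((bnum.toNat : Int)) := by
            rw [← (show bnum = (bnum.toNat : Int) by omega)]
        _ = (2:ℚ) ^ (bnum.toNat) := zpow_natCast _ _
        _ = (((2:Int) ^ bnum.toNat : Int) : ℚ) := by push_cast; ring
    have hsq : (2:ℚ) ^ bnum - 1 = ((k - 1 : Int) : ℚ) := by rw [hkq]; push_cast; ring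
    have hcq : (if ((k - 1 : Int) : ℚ) = 0 then (2:ℚ) ^ bnum else (0:ℚ))
        = (((if k - 1 = 0 then k else 0) : Int) : ℚ) := by
      by_cases h : k - 1 = 0
      · rw [if_pos (by exact_mod_cast h), if_pos h, hkq]
      · rw [if_neg (by exact_mod_cast h), if_neg h]
        norm_num
    rw [hsq, hcq, pv_cast_loop bnum out_width hb' (out_width - 0).toNat 0 [] 0 _ _ rfl]
    have hinv0 : pvInv k 0 (k - 1) (if k - 1 = 0 then k else 0) := by
      unfold pvInv
      rw [Int.zero_emod]
      by_cases hk1' : k = 1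
      · left
        rw [if_pos (by omega)]
        exact ⟨by omega, by omega, by omega⟩
      · right
        rw [if_neg (by omega)]
        exact ⟨rfl, Or.inr ⟨by omega, by omega⟩⟩
    rw [pv_loop_eq k out_width hk1 (out_width - 0).toNat 0 [] 0 _ _ rfl hinv0]
    simp
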